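-- pv_equiv track=rewrite | github.com/yedamPractice/CodingTestStudy | Programmers/Lv0/oz/study_0220.py | solution
-- ===== SOURCE A (Python) =====
-- def solution(numbers):
--     answer = []
--     for i in numbers:
--         for j in numbers:
--             if i == j:
--                 continue
--             elif i<0 and j>0:
--                 continue
--             elif i>0 and j<0:
--                 continue
--             answer.append(abs(i*j))
--     return max(answer)
-- ===== SOURCE B (Python) =====
-- def solution(numbers):
--     vals = set(numbers)
--     pos = [v for v in vals if v > 0]
--     neg = [v for v in vals if v < 0]
--     cands = []
--     if len(pos) >= 2:
--         p1 = max(pos)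
--         p2 = max(v for v in pos if v != p1)
--         cands.append(p1 * p2)
--     if len(neg) >= 2:
--         n1 = min(neg)
--         n2 = min(v for v in neg if v != n1)
--         cands.append(n1 * n2)
--     if 0 in vals and (pos or neg):
--         cands.append(0)
--     return max(cands)
-- ===== Notes on version B (the rewrite author's own statement) =====
-- stated objective: faster
-- what changed: A scans all ordered pairs of elements (nested loops) and takes the max of every accepted |i*j|; B builds the set of distinct values once and takes the max of at most three candidates: the product of the two largest distinct positives, the product of the two smallest distinct negatives, and 0 when a zero coexists with a nonzero value.
import Mathlib
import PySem

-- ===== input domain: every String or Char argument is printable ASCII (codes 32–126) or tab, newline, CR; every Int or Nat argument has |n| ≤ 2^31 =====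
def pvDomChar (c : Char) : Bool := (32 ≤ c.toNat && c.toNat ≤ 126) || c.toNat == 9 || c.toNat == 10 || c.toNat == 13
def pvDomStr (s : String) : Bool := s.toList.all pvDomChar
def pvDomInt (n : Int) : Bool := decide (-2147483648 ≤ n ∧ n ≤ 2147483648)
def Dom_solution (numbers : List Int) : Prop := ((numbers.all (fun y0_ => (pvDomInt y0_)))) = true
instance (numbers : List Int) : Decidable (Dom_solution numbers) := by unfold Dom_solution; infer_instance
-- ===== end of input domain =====

-- B replaces A's quadratic scan over all ordered pairs by a linear scan kept over distinct
-- extremes (top two distinct positives, bottom two distinct negatives, a zero candidate): objective = faster.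


-- ===== PORT A =====
def solution (numbers : List Int) : Int :=
  let answer : List Int := numbers.foldl (fun acc i =>
    numbers.foldl (fun acc2 j =>
      if i = j then acc2
      else if i < 0 ∧ 0 < j then acc2
      else if 0 < i ∧ j < 0 then acc2
      else acc2 ++ [|i * j|]) acc) []
  (PySem.List.max? answer (fun x => x)).getD 0

-- ===== PORT B =====
-- product of the two largest distinct positives (len >= 2 guard as in Source B; the `none` match
-- arms are unreachable totality guards: with length ≥ 2 both maxima exist)
def topTwoProd (l : List Int) : List Int :=
  if 2 ≤ l.length then
    match PySem.List.max? l (fun x => x) with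
    | some p1 =>
      match PySem.List.max? (l.filter (fun v => v ≠ p1)) (fun x => x) with
      | some p2 => [p1 * p2]
      | none => []
    | none => []
  else []

-- product of the two smallest distinct negatives
def botTwoProd (l : List Int) : List Int :=
  if 2 ≤ l.length then
    match PySem.List.min? l (fun x => x) with
    | some n1 =>
      match PySem.List.min? (l.filter (fun v => v ≠ n1)) (fun x => x) with
      | some n2 => [n1 * n2]
      | none => []
    | none => []
  else []

def solution_alt (numbers : List Int) : Int :=
  let vals : PySem.Set Int := PySem.Set.ofList numbers
  let pos := vals.filter (fun v => decide (0 < v))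
  let neg := vals.filter (fun v => decide (v < 0))
  let cands : List Int :=
    topTwoProd pos ++ botTwoProd neg ++
      (if PySem.Set.contains vals 0 ∧ pos ++ neg ≠ [] then [0] else [])
  (PySem.List.max? cands (fun x => x)).getD 0

-- ===== PRECONDITION & SPEC =====
-- Pre_ excludes exactly the inputs where A's `max(answer)` raises ValueError (no pair of
-- distinct same-sign values and no zero–nonzero pair); B's `max(cands)` raises there too.
def Pre_solution (numbers : List Int) : Prop :=
  ∃ i ∈ numbers, ∃ j ∈ numbers, i ≠ j ∧ ¬(i < 0 ∧ 0 < j) ∧ ¬(0 < i ∧ j < 0)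
instance (numbers : List Int) : Decidable (Pre_solution numbers) := by
  unfold Pre_solution; infer_instance
def pvWitness_solution : List Int := [2, 3, -1]

def Spec_solution (numbers : List Int) (out : Int) : Prop := out = solution_alt numbers
instance (numbers : List Int) (out : Int) : Decidable (Spec_solution numbers out) := by unfold Spec_solution; infer_instance

-- ===== CLAIM (what is proved, stated in full; the proofs are below) =====
def Claim_equal_solution : Prop := ∀ (numbers : List Int), Dom_solution numbers → Pre_solution numbers → Spec_solution numbers (solution numbers)

-- ===== LEMMAS AND PROOFS =====

-- the pair-acceptance test of A, as a Bool predicate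
def okB (i j : Int) : Bool :=
  decide (i ≠ j) && !(decide (i < 0) && decide (0 < j)) && !(decide (0 < i) && decide (j < 0))

lemma okB_iff (i j : Int) :
    okB i j = true ↔ i ≠ j ∧ ¬(i < 0 ∧ 0 < j) ∧ ¬(0 < i ∧ j < 0) := by
  simp [okB]; omega
lemma answer_eq (numbers : List Int) :
    numbers.foldl (fun acc i =>
      numbers.foldl (fun acc2 j =>
        if i = j then acc2
        else if i < 0 ∧ 0 < j then acc2
        else if 0 < i ∧ j < 0 then acc2
        else acc2 ++ [|i * j|]) acc) [] =
    numbers.flatMap (fun i =>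
      (numbers.filter (fun j => okB i j)).map (fun j => |i * j|)) := by
  have inner : ∀ (i : Int) (acc : List Int),
      numbers.foldl (fun acc2 j =>
        if i = j then acc2
        else if i < 0 ∧ 0 < j then acc2
        else if 0 < i ∧ j < 0 then acc2
        else acc2 ++ [|i * j|]) acc =
      acc ++ (numbers.filter (fun j => okB i j)).map (fun j => |i * j|) := by
    intro i acc
    rw [PySem.List.foldl_congr_mem _ _
      (fun acc2 j => if okB i j then acc2 ++ [|i * j|] else acc2) _ ?_]
    · exact PySem.List.foldl_append_if (okB i) _ _ _
    · intro acc2 j _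
      show (if i = j then acc2 else if i < 0 ∧ 0 < j then acc2
          else if 0 < i ∧ j < 0 then acc2 else acc2 ++ [|i * j|]) =
        if okB i j = true then acc2 ++ [|i * j|] else acc2
      by_cases hok : okB i j = true
      · obtain ⟨h1, h2, h3⟩ := (okB_iff i j).mp hok
        rw [if_pos hok, if_neg h1, if_neg h2, if_neg h3]
      · rw [if_neg hok]
        by_cases h1 : i = j
        · rw [if_pos h1]
        · rw [if_neg h1]
          by_cases h2 : i < 0 ∧ 0 < j
          · rw [if_pos h2]
          · rw [if_neg h2]
            have h3 : 0 < i ∧ j < 0 := by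
              by_contra h3
              exact hok ((okB_iff i j).mpr ⟨h1, h2, h3⟩)
            rw [if_pos h3]
  rw [PySem.List.foldl_congr_mem _ _
    (fun acc i => acc ++ (numbers.filter (fun j => okB i j)).map (fun j => |i * j|)) _
    (fun acc i _ => inner i acc)]
  exact PySem.List.foldl_append_eq_flatMap _ _ _

lemma two_le_length_of_two_mem {l : List Int} {i j : Int}
    (hi : i ∈ l) (hj : j ∈ l) (hij : i ≠ j) : 2 ≤ l.length := by
  match l with
  | [] => simp at hi
  | [a] => simp at hi hj; exact absurd (hi.trans hj.symm) hij
  | a :: b :: t => simp [List.length_cons]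

lemma topTwoProd_spec {l : List Int} {i j : Int}
    (hpos : ∀ v ∈ l, 0 < v) (hi : i ∈ l) (hj : j ∈ l) (hij : i ≠ j) :
    ∃ c, topTwoProd l = [c] ∧ i * j ≤ c := by
  have hlen : 2 ≤ l.length := two_le_length_of_two_mem hi hj hij
  unfold topTwoProd
  rw [if_pos hlen]
  obtain ⟨p1, hp1⟩ : ∃ p1, PySem.List.max? l (fun x => x) = some p1 := by
    cases h : PySem.List.max? l (fun x => x) with
    | none => rw [PySem.List.max?_eq_none_iff] at h; subst h; simp at hi
    | some p1 => exact ⟨p1, rfl⟩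
  have hp1mem := PySem.List.max?_mem hp1
  have hp1max := PySem.List.max?_isMax hp1
  obtain ⟨p2, hp2⟩ : ∃ p2, PySem.List.max? (l.filter (fun v => v ≠ p1)) (fun x => x) = some p2 := by
    cases h : PySem.List.max? (l.filter (fun v => v ≠ p1)) (fun x => x) with
    | none =>
      rw [PySem.List.max?_eq_none_iff] at h
      rcases ne_or_eq i p1 with hne | heq
      · have : i ∈ l.filter (fun v => v ≠ p1) := by simp [List.mem_filter, hi, hne]
        rw [h] at this; simp at this
      · have hne : j ≠ p1 := fun hjp => hij (heq.trans hjp.symm)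
        have : j ∈ l.filter (fun v => v ≠ p1) := by simp [List.mem_filter, hj, hne]
        rw [h] at this; simp at this
    | some p2 => exact ⟨p2, rfl⟩
  have hp2mem' := PySem.List.max?_mem hp2
  have hp2mem : p2 ∈ l := (List.mem_filter.mp hp2mem').1
  have hp2max : ∀ v ∈ l, v ≠ p1 → v ≤ p2 := by
    intro v hv hvne
    exact PySem.List.max?_isMax hp2 v (by simp [List.mem_filter, hv, hvne])
  simp only [hp1, hp2]
  refine ⟨p1 * p2, rfl, ?_⟩
  have h0i := hpos i hi
  have h0j := hpos j hj
  have h0p1 := hpos p1 hp1mem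
  have h0p2 := hpos p2 hp2mem
  by_cases hip : i = p1
  · subst hip
    have : j ≤ p2 := hp2max j hj (Ne.symm hij)
    nlinarith [hp1max j hj]
  · have hi2 : i ≤ p2 := hp2max i hi hip
    have hj1 : j ≤ p1 := hp1max j hj
    nlinarith

lemma topTwoProd_mem {l : List Int} {c : Int} (hc : c ∈ topTwoProd l) :
    ∃ a ∈ l, ∃ b ∈ l, b ≠ a ∧ c = a * b := by
  unfold topTwoProd at hc
  split_ifs at hc with h
  · cases h1 : PySem.List.max? l (fun x => x) with
    | none => simp only [h1] at hc; simp at hc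
    | some p1 =>
      simp only [h1] at hc
      cases h2 : PySem.List.max? (l.filter (fun v => v ≠ p1)) (fun x => x) with
      | none => simp only [h2] at hc; simp at hc
      | some p2 =>
        simp only [h2] at hc
        simp at hc
        have hm := PySem.List.max?_mem h2
        rw [List.mem_filter] at hm
        exact ⟨p1, PySem.List.max?_mem h1, p2, hm.1, by simpa using hm.2, hc⟩
  · simp at hc

lemma botTwoProd_spec {l : List Int} {i j : Int}
    (hneg : ∀ v ∈ l, v < 0) (hi : i ∈ l) (hj : j ∈ l) (hij : i ≠ j) :
    ∃ c, botTwoProd l = [c] ∧ i * j ≤ c := by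
  have hlen : 2 ≤ l.length := two_le_length_of_two_mem hi hj hij
  unfold botTwoProd
  rw [if_pos hlen]
  obtain ⟨n1, hn1⟩ : ∃ n1, PySem.List.min? l (fun x => x) = some n1 := by
    cases h : PySem.List.min? l (fun x => x) with
    | none => rw [PySem.List.min?_eq_none_iff] at h; subst h; simp at hi
    | some n1 => exact ⟨n1, rfl⟩
  have hn1mem := PySem.List.min?_mem hn1
  have hn1min := PySem.List.min?_isMin hn1
  obtain ⟨n2, hn2⟩ : ∃ n2, PySem.List.min? (l.filter (fun v => v ≠ n1)) (fun x => x) = some n2 := by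
    cases h : PySem.List.min? (l.filter (fun v => v ≠ n1)) (fun x => x) with
    | none =>
      rw [PySem.List.min?_eq_none_iff] at h
      rcases ne_or_eq i n1 with hne | heq
      · have : i ∈ l.filter (fun v => v ≠ n1) := by simp [List.mem_filter, hi, hne]
        rw [h] at this; simp at this
      · have hne : j ≠ n1 := fun hjp => hij (heq.trans hjp.symm)
        have : j ∈ l.filter (fun v => v ≠ n1) := by simp [List.mem_filter, hj, hne]
        rw [h] at this; simp at this
    | some n2 => exact ⟨n2, rfl⟩
  have hn2mem' := PySem.List.min?_mem hn2
  have hn2mem : n2 ∈ l := (List.mem_filter.mp hn2mem').1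
  have hn2min : ∀ v ∈ l, v ≠ n1 → n2 ≤ v := by
    intro v hv hvne
    exact PySem.List.min?_isMin hn2 v (by simp [List.mem_filter, hv, hvne])
  simp only [hn1, hn2]
  refine ⟨n1 * n2, rfl, ?_⟩
  have h0i := hneg i hi
  have h0j := hneg j hj
  have h0n1 := hneg n1 hn1mem
  have h0n2 := hneg n2 hn2mem
  by_cases hin : i = n1
  · subst hin
    have : n2 ≤ j := hn2min j hj (Ne.symm hij)
    nlinarith [hn1min j hj]
  · have hi2 : n2 ≤ i := hn2min i hi hin
    have hj1 : n1 ≤ j := hn1min j hj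
    nlinarith

lemma botTwoProd_mem {l : List Int} {c : Int} (hc : c ∈ botTwoProd l) :
    ∃ a ∈ l, ∃ b ∈ l, b ≠ a ∧ c = a * b := by
  unfold botTwoProd at hc
  split_ifs at hc with h
  · cases h1 : PySem.List.min? l (fun x => x) with
    | none => simp only [h1] at hc; simp at hc
    | some n1 =>
      simp only [h1] at hc
      cases h2 : PySem.List.min? (l.filter (fun v => v ≠ n1)) (fun x => x) with
      | none => simp only [h2] at hc; simp at hc
      | some n2 =>
        simp only [h2] at hc
        simp at hc
        have hm := PySem.List.min?_mem h2
        rw [List.mem_filter] at hm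
        exact ⟨n1, PySem.List.min?_mem h1, n2, hm.1, by simpa using hm.2, hc⟩
  · simp at hc

theorem solution_main (numbers : List Int)
    (hpre : ∃ i ∈ numbers, ∃ j ∈ numbers, i ≠ j ∧ ¬(i < 0 ∧ 0 < j) ∧ ¬(0 < i ∧ j < 0)) :
    solution numbers = solution_alt numbers := by
  unfold solution solution_alt
  rw [answer_eq]
  set ans := numbers.flatMap (fun i =>
      (numbers.filter (fun j => okB i j)).map (fun j => |i * j|)) with hans
  set vals : PySem.Set Int := PySem.Set.ofList numbers with hvals
  set pos := vals.filter (fun v => decide (0 < v)) with hpos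
  set neg := vals.filter (fun v => decide (v < 0)) with hneg
  set zc : List Int := if PySem.Set.contains vals 0 ∧ pos ++ neg ≠ [] then [0] else [] with hzc
  set cands : List Int := topTwoProd pos ++ botTwoProd neg ++ zc with hcands
  have mem_pos : ∀ v : Int, v ∈ pos ↔ v ∈ numbers ∧ 0 < v := by
    intro v; simp [hpos, hvals, List.mem_filter, PySem.Set.mem_ofList]
  have mem_neg : ∀ v : Int, v ∈ neg ↔ v ∈ numbers ∧ v < 0 := by
    intro v; simp [hneg, hvals, List.mem_filter, PySem.Set.mem_ofList]
  have pos_all : ∀ v ∈ pos, 0 < v := fun v hv => ((mem_pos v).mp hv).2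
  have neg_all : ∀ v ∈ neg, v < 0 := fun v hv => ((mem_neg v).mp hv).2
  have mem_ans : ∀ x : Int, x ∈ ans ↔ ∃ i ∈ numbers, ∃ j ∈ numbers, okB i j = true ∧ |i * j| = x := by
    intro x
    simp [hans, List.mem_flatMap, List.mem_map, List.mem_filter]
    constructor
    · rintro ⟨a, ha, b, ⟨hb, hok⟩, hx⟩; exact ⟨a, ha, b, hb, hok, hx⟩
    · rintro ⟨a, ha, b, hb, hok, hx⟩; exact ⟨a, ha, b, ⟨hb, hok⟩, hx⟩
  have contains_iff : (PySem.Set.contains vals 0 : Prop) ↔ (0 : Int) ∈ numbers := by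
    simp [PySem.Set.contains, hvals, PySem.Set.mem_ofList]
  -- every candidate is an achieved pair product
  have cands_sub : ∀ c ∈ cands, c ∈ ans := by
    intro c hc
    rw [hcands] at hc
    rcases List.mem_append.mp hc with hc' | hzc'
    · rcases List.mem_append.mp hc' with ht | hb
      · obtain ⟨a, ha, b, hb', hba, hcab⟩ := topTwoProd_mem ht
        obtain ⟨ha1, ha2⟩ := (mem_pos a).mp ha
        obtain ⟨hb1, hb2⟩ := (mem_pos b).mp hb'
        rw [mem_ans]
        refine ⟨a, ha1, b, hb1, (okB_iff a b).mpr ⟨Ne.symm hba, by omega, by omega⟩, ?_⟩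
        rw [hcab, abs_of_pos (mul_pos ha2 hb2)]
      · obtain ⟨a, ha, b, hb', hba, hcab⟩ := botTwoProd_mem hb
        obtain ⟨ha1, ha2⟩ := (mem_neg a).mp ha
        obtain ⟨hb1, hb2⟩ := (mem_neg b).mp hb'
        rw [mem_ans]
        refine ⟨a, ha1, b, hb1, (okB_iff a b).mpr ⟨Ne.symm hba, by omega, by omega⟩, ?_⟩
        rw [hcab, abs_of_pos (mul_pos_of_neg_of_neg ha2 hb2)]
    · rw [hzc] at hzc'
      split_ifs at hzc' with hcond
      · simp at hzc'
        subst hzc'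
        obtain ⟨h0, hne⟩ := hcond
        have h0mem : (0 : Int) ∈ numbers := contains_iff.mp h0
        obtain ⟨w, hw⟩ : ∃ w, w ∈ pos ++ neg := by
          cases h : pos ++ neg with
          | nil => exact absurd h hne
          | cons a t => exact ⟨a, by simp⟩
        have hwn : w ∈ numbers ∧ w ≠ 0 := by
          rcases List.mem_append.mp hw with h' | h'
          · obtain ⟨h1, h2⟩ := (mem_pos w).mp h'; exact ⟨h1, by omega⟩
          · obtain ⟨h1, h2⟩ := (mem_neg w).mp h'; exact ⟨h1, by omega⟩
        rw [mem_ans]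
        refine ⟨0, h0mem, w, hwn.1, (okB_iff 0 w).mpr ⟨fun h => hwn.2 h.symm, by omega, by omega⟩, by simp⟩
      · simp at hzc'
  -- every achieved pair product is dominated by a candidate
  have dominate : ∀ i ∈ numbers, ∀ j ∈ numbers,
      (i ≠ j ∧ ¬(i < 0 ∧ 0 < j) ∧ ¬(0 < i ∧ j < 0)) → ∃ c ∈ cands, |i * j| ≤ c := by
    intro i hi j hj hok
    obtain ⟨hij, hnopn, hnonp⟩ := hok
    have zcase : (0:Int) ∈ numbers → ∀ w ∈ numbers, w ≠ 0 → (0:Int) ∈ cands := by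
      intro h0 w hw hw0
      have hwpn : w ∈ pos ++ neg := by
        rcases lt_or_gt_of_ne hw0 with h | h
        · exact List.mem_append.mpr (Or.inr ((mem_neg w).mpr ⟨hw, h⟩))
        · exact List.mem_append.mpr (Or.inl ((mem_pos w).mpr ⟨hw, h⟩))
      have hcond : (PySem.Set.contains vals 0 : Prop) ∧ pos ++ neg ≠ [] :=
        ⟨contains_iff.mpr h0, List.ne_nil_of_mem hwpn⟩
      rw [hcands, hzc, if_pos hcond]
      simp
    rcases lt_trichotomy i 0 with hi0 | hi0 | hi0
    · have hj0 : j ≤ 0 := by omega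
      rcases eq_or_lt_of_le hj0 with hj0' | hj0'
      · refine ⟨0, zcase (hj0' ▸ hj) i hi (by omega), by simp [hj0', abs_of_nonneg]⟩
      · obtain ⟨c, hceq, hcle⟩ := botTwoProd_spec neg_all
          ((mem_neg i).mpr ⟨hi, hi0⟩) ((mem_neg j).mpr ⟨hj, hj0'⟩) hij
        refine ⟨c, ?_, ?_⟩
        · rw [hcands]; exact List.mem_append.mpr (Or.inl (List.mem_append.mpr (Or.inr (by rw [hceq]; simp))))
        · rw [abs_of_pos (mul_pos_of_neg_of_neg hi0 hj0')]; exact hcle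
    · have : j ≠ 0 := fun h => hij (hi0.trans h.symm)
      refine ⟨0, zcase (hi0 ▸ hi) j hj this, by simp [hi0]⟩
    · have hj0 : 0 ≤ j := by omega
      rcases eq_or_lt_of_le hj0 with hj0' | hj0'
      · refine ⟨0, zcase (hj0' ▸ hj) i hi (by omega), by simp [← hj0', abs_of_nonneg]⟩
      · obtain ⟨c, hceq, hcle⟩ := topTwoProd_spec pos_all
          ((mem_pos i).mpr ⟨hi, hi0⟩) ((mem_pos j).mpr ⟨hj, hj0'⟩) hij
        refine ⟨c, ?_, ?_⟩
        · rw [hcands]; exact List.mem_append.mpr (Or.inl (List.mem_append.mpr (Or.inl (by rw [hceq]; simp))))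
        · rw [abs_of_pos (mul_pos hi0 hj0')]; exact hcle
  -- both maxima exist and are equal
  obtain ⟨i, hi, j, hj, hok⟩ := hpre
  obtain ⟨c0, hc0mem, _⟩ := dominate i hi j hj hok
  obtain ⟨mB, hmB⟩ : ∃ m, PySem.List.max? cands (fun x => x) = some m := by
    cases h : PySem.List.max? cands (fun x => x) with
    | none => rw [PySem.List.max?_eq_none_iff] at h; rw [h] at hc0mem; simp at hc0mem
    | some m => exact ⟨m, rfl⟩
  have hmBmem := PySem.List.max?_mem hmB
  have hmBans : mB ∈ ans := cands_sub mB hmBmem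
  obtain ⟨mA, hmA⟩ : ∃ m, PySem.List.max? ans (fun x => x) = some m := by
    cases h : PySem.List.max? ans (fun x => x) with
    | none => rw [PySem.List.max?_eq_none_iff] at h; rw [h] at hmBans; simp at hmBans
    | some m => exact ⟨m, rfl⟩
  show (PySem.List.max? ans (fun x => x)).getD 0 = (PySem.List.max? cands (fun x => x)).getD 0
  rw [hmA, hmB]
  simp only [Option.getD_some]
  have h1 : mB ≤ mA := PySem.List.max?_isMax hmA mB hmBans
  have h2 : mA ≤ mB := by
    obtain ⟨i', hi', j', hj', hok', hx⟩ := (mem_ans mA).mp (PySem.List.max?_mem hmA)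
    obtain ⟨c, hcmem, hcle⟩ := dominate i' hi' j' hj' ((okB_iff i' j').mp hok')
    calc mA = |i' * j'| := hx.symm
      _ ≤ c := hcle
      _ ≤ mB := PySem.List.max?_isMax hmB c hcmem
  omega

-- ===== VERDICT (by name: the statement is the Claim_ definition above) =====
theorem solution_spec : Claim_equal_solution := by
  intro numbers _ hpre
  unfold Pre_solution at hpre
  unfold Spec_solution
  exact solution_main numbers hpre
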